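-- pv_equiv track=rewrite | github.com/geunu97/Repository_Algorithm2 | 2021 Dev-Matching_웹 백엔드/(LV2) 2021_Dev_Matching.py | solution
-- ===== SOURCE A (Python) =====
-- def rotate(x1, y1, x2, y2, graph):
--
--     s = graph[x1][y1]  #맨 왼쪽 맨 위에 값
--     list_new = []
--
--     #핵심1) 왼쪽 열을 위로 한칸씩 올리기
--     for x in range(x1, x2):
--         graph[x][y1] = graph[x + 1][y1]
--         list_new.append(graph[x][y1])
--
--     #핵심2) 아래 행을 왼쪽으로 한칸씩 이동하기
--     for y in range(y1, y2):
--         graph[x2][y] = graph[x2][y + 1]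
--         list_new.append(graph[x2][y])
--
--     #핵심3) 오른쪽 열을 아래로 한칸씩 내리기
--     for x in range(x2, x1, -1):
--         graph[x][y2] = graph[x-1][y2]
--         list_new.append(graph[x][y2])
--
--     #핵심4) 위에 행을 오른쪽으로 한칸씩 밀기(x1,y1+1에서 시작해야 함)
--     for y in range(y2, y1 + 1, -1):
--         graph[x1][y] = graph[x1][y - 1]
--         list_new.append(graph[x1][y])
--
--     graph[x1][y1+1] = s
--     list_new.append(s)
--
--     return min(list_new)
--
-- def solution(rows, columns, queries):
--     answer = []
--
--     graph = [[1] * columns for _ in range(rows)]   #행 열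
--
--     for i in range(rows):
--         for j in range(columns):
--             graph[i][j] = ((i) * columns + j + 1)  #값 넣기
--
--     for x1, y1, x2, y2 in queries:
--         answer.append(rotate(x1-1, y1-1, x2-1, y2-1, graph)) # -1씩 해주고 넣기
--
--     return answer
-- ===== SOURCE B (Python) =====
-- def _succ(x, y, x1, y1, x2, y2):
--     # cyclic counter-clockwise predecessor-source on the ring border
--     if y == y1 and x < x2:
--         return (x + 1, y)
--     if x == x2 and y < y2:
--         return (x, y + 1)
--     if y == y2 and x > x1:
--         return (x - 1, y)
--     return (x, y - 1)
--
-- def solution(rows, columns, queries):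
--     grid = [[i * columns + j + 1 for j in range(columns)] for i in range(rows)]
--     out = []
--     for a, b, c, d in queries:
--         x1, y1, x2, y2 = a - 1, b - 1, c - 1, d - 1
--         coords = ([(x, y1) for x in range(x1, x2 + 1)]
--                   + [(x2, y) for y in range(y1 + 1, y2 + 1)]
--                   + [(x, y2) for x in range(x2 - 1, x1 - 1, -1)]
--                   + [(x1, y) for y in range(y2 - 1, y1, -1)])
--         old = {p: grid[p[0]][p[1]] for p in coords}
--         for (x, y) in coords:
--             grid[x][y] = old[_succ(x, y, x1, y1, x2, y2)]
--         out.append(min(old.values()))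
--     return out
-- ===== Notes on version B (the rewrite author's own statement) =====
-- stated objective: alternative
-- what changed: Replaces A's four sequential in-place shifting loops per query by a gather/rotate/write-back decomposition: collect the ring's border cells once, write each cell the saved old value of its cyclic successor given by a closed-form successor function, and return the min of the gathered values.
-- outside the precondition, e.g. on solution(3, 3, [(1, 1, 1, 1)]): A returns [1], B raises KeyError; on solution(3, 3, [(2, 1, 1, 2)]): A returns [2], B raises KeyError; on solution(2, 2, [(0, 1, 2, 2)]): A returns [1], B returns [1]
import Mathlib
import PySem

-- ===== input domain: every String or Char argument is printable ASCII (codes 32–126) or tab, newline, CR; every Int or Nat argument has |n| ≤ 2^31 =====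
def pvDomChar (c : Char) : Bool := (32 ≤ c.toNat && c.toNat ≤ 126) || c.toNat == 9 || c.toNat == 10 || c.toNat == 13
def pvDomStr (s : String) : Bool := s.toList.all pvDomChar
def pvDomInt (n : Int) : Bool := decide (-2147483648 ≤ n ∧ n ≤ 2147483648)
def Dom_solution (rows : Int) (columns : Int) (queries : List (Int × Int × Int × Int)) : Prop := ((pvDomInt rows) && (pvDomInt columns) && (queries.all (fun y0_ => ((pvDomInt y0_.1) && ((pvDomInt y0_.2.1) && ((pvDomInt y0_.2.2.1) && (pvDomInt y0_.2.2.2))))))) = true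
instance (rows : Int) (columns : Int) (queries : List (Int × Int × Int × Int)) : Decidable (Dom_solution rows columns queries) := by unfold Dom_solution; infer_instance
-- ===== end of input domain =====

-- B replaces A's four sequential shifting loops per query by gather/rotate/write-back over the ring
-- using a closed-form cyclic-successor function; same per-query mutation of the shared grid
-- (objective: alternative). Both ports model the mutable grid as a function Int → Int → Int,
-- exact on the in-range cells — the only cells read under Pre_solution.

-- ===== PORT A =====

-- functional update of one grid cell: graph[i][j] = v
def pvUpd (g : Int → Int → Int) (i j v : Int) : Int → Int → Int :=
  fun x y => if x = i ∧ y = j then v else g x y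

-- Python min(list); the 0 default is unreachable here (rotate's list always ends with s)
def pvMin : List Int → Int
  | [] => 0
  | h :: t => t.foldl min h

-- shared shape of A's four loops: for t in L: graph[pos t] = graph[src t]; list_new.append(graph[pos t])
def pvLoop (pos src : Int → Int × Int) (L : List Int)
    (g : Int → Int → Int) (l : List Int) : (Int → Int → Int) × List Int :=
  L.foldl (fun p t =>
    let g' := pvUpd p.1 (pos t).1 (pos t).2 (p.1 (src t).1 (src t).2)
    (g', p.2 ++ [g' (pos t).1 (pos t).2])) (g, l)

-- A's rotate(x1, y1, x2, y2, graph): returns (min(list_new), mutated grid)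
def pvRotate (a b c d : Int) (g : Int → Int → Int) : Int × (Int → Int → Int) :=
  let s := g a b
  let p1 := pvLoop (fun x => (x, b)) (fun x => (x + 1, b)) (PySem.List.pyRange a c 1) g []
  let p2 := pvLoop (fun y => (c, y)) (fun y => (c, y + 1)) (PySem.List.pyRange b d 1) p1.1 p1.2
  let p3 := pvLoop (fun x => (x, d)) (fun x => (x - 1, d)) (PySem.List.pyRange c a (-1)) p2.1 p2.2
  let p4 := pvLoop (fun y => (a, y)) (fun y => (a, y - 1)) (PySem.List.pyRange d (b + 1) (-1)) p3.1 p3.2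
  let g5 := pvUpd p4.1 a (b + 1) s
  (pvMin (p4.2 ++ [s]), g5)

def solution (rows : Int) (columns : Int) (queries : List (Int × Int × Int × Int)) : List Int :=
  -- graph = [[1]*columns for _ in range(rows)]
  let g0 : Int → Int → Int := fun _ _ => 1
  -- nested loops: graph[i][j] = i*columns + j + 1
  let g1 := (PySem.List.pyRange 0 rows 1).foldl (fun g i =>
      (PySem.List.pyRange 0 columns 1).foldl (fun g j => pvUpd g i j (i * columns + j + 1)) g) g0
  (queries.foldl (fun (p : List Int × (Int → Int → Int)) q =>
      let t := pvRotate (q.1 - 1) (q.2.1 - 1) (q.2.2.1 - 1) (q.2.2.2 - 1) p.2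
      (p.1 ++ [t.1], t.2)) ([], g1)).1

-- ===== PORT B =====

-- _succ of Source B: the cell each ring cell takes its new value from
def pvSucc (x1 y1 x2 y2 : Int) (p : Int × Int) : Int × Int :=
  if p.2 = y1 ∧ p.1 < x2 then (p.1 + 1, p.2)
  else if p.1 = x2 ∧ p.2 < y2 then (p.1, p.2 + 1)
  else if p.2 = y2 ∧ p.1 > x1 then (p.1 - 1, p.2)
  else (p.1, p.2 - 1)

-- coords of Source B: the ring border in one fixed traversal order
def pvRing (x1 y1 x2 y2 : Int) : List (Int × Int) :=
  (PySem.List.pyRange x1 (x2 + 1) 1).map (fun x => (x, y1))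
  ++ (PySem.List.pyRange (y1 + 1) (y2 + 1) 1).map (fun y => (x2, y))
  ++ (PySem.List.pyRange (x2 - 1) (x1 - 1) (-1)).map (fun x => (x, y2))
  ++ (PySem.List.pyRange (y2 - 1) y1 (-1)).map (fun y => (x1, y))

-- one query of Source B: save old ring values, write each cell its successor's old value, min of values
def pvRotateAlt (x1 y1 x2 y2 : Int) (g : Int → Int → Int) : Int × (Int → Int → Int) :=
  let coords := pvRing x1 y1 x2 y2
  let old : Int × Int → Int := fun p => g p.1 p.2
  let g' := coords.foldl (fun h p => pvUpd h p.1 p.2 (old (pvSucc x1 y1 x2 y2 p))) g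
  (pvMin (coords.map old), g')

def solution_alt (rows : Int) (columns : Int) (queries : List (Int × Int × Int × Int)) : List Int :=
  -- grid = [[i*columns + j + 1 for j in range(columns)] for i in range(rows)]
  let grid : Int → Int → Int := fun i j =>
    if 0 ≤ i ∧ i < rows ∧ 0 ≤ j ∧ j < columns then i * columns + j + 1 else 0
  (queries.foldl (fun (p : List Int × (Int → Int → Int)) q =>
      let t := pvRotateAlt (q.1 - 1) (q.2.1 - 1) (q.2.2.1 - 1) (q.2.2.2 - 1) p.2
      (p.1 ++ [t.1], t.2)) ([], grid)).1

-- ===== PRECONDITION & SPEC =====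
-- Pre_ restricts to proper in-bounds rectangle queries (1 ≤ x1 < x2 ≤ rows, 1 ≤ y1 < y2 ≤ columns):
-- outside it A raises IndexError, or returns accidental values via Python's negative-index
-- wraparound or its degenerate-ring writes, while B's dict of ring cells raises KeyError
-- (or wraps likewise).
def Pre_solution (rows : Int) (columns : Int) (queries : List (Int × Int × Int × Int)) : Prop :=
  ∀ q ∈ queries, 1 ≤ q.1 ∧ q.1 < q.2.2.1 ∧ q.2.2.1 ≤ rows ∧
                 1 ≤ q.2.1 ∧ q.2.1 < q.2.2.2 ∧ q.2.2.2 ≤ columns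
instance (rows : Int) (columns : Int) (queries : List (Int × Int × Int × Int)) : Decidable (Pre_solution rows columns queries) := by unfold Pre_solution; infer_instance

def pvWitness_solution : Int × Int × (List (Int × Int × Int × Int)) := (3, 3, [(1, 1, 3, 3), (1, 2, 2, 3)])

def Spec_solution (rows : Int) (columns : Int) (queries : List (Int × Int × Int × Int)) (out : List Int) : Prop := out = solution_alt rows columns queries
instance (rows : Int) (columns : Int) (queries : List (Int × Int × Int × Int)) (out : List Int) : Decidable (Spec_solution rows columns queries out) := by unfold Spec_solution; infer_instance

-- ===== CLAIM (what is proved, stated in full; the proofs are below) =====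
def Claim_equal_solution : Prop := ∀ (rows : Int) (columns : Int) (queries : List (Int × Int × Int × Int)), Dom_solution rows columns queries → Pre_solution rows columns queries → Spec_solution rows columns queries (solution rows columns queries)

-- ===== LEMMAS AND PROOFS =====

theorem pvUpd_self (g : Int → Int → Int) (i j v : Int) : pvUpd g i j v i j = v := by
  simp [pvUpd]

theorem pvUpd_ne (g : Int → Int → Int) (i j v x y : Int) (h : ¬(x = i ∧ y = j)) :
    pvUpd g i j v x y = g x y := by
  simp only [pvUpd, if_neg h]

theorem pvUpd_ne_pair (g : Int → Int → Int) (q : Int × Int) (v : Int) (p : Int × Int)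
    (h : p ≠ q) : pvUpd g q.1 q.2 v p.1 p.2 = g p.1 p.2 := by
  refine pvUpd_ne _ _ _ _ _ _ (fun hc => h ?_)
  exact Prod.ext_iff.mpr hc

theorem pvPairNe₁ {x x' y y' : Int} (h : x ≠ x') : ((x, y) : Int × Int) ≠ (x', y') :=
  fun hc => h (congrArg Prod.fst hc)

theorem pvPairNe₂ {x x' y y' : Int} (h : y ≠ y') : ((x, y) : Int × Int) ≠ (x', y') :=
  fun hc => h (congrArg Prod.snd hc)

-- characterization of one of A's shifting loops, given that later reads never hit earlier
-- writes and that the written cells are pairwise distinct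
theorem pvLoop_char (pos src : Int → Int × Int) :
    ∀ (L : List Int), L.Pairwise (fun t u => src u ≠ pos t ∧ pos t ≠ pos u) →
    ∀ (g : Int → Int → Int) (l : List Int),
      ((pvLoop pos src L g l).2 = l ++ L.map (fun t => g (src t).1 (src t).2)) ∧
      (∀ t ∈ L, (pvLoop pos src L g l).1 (pos t).1 (pos t).2 = g (src t).1 (src t).2) ∧
      (∀ x y, (∀ t ∈ L, (x, y) ≠ pos t) → (pvLoop pos src L g l).1 x y = g x y) := by
  intro L
  induction L with
  | nil =>
      intro _ g l
      refine ⟨by simp [pvLoop], by simp, fun x y _ => by simp [pvLoop]⟩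
  | cons t L ih =>
      intro hp g l
      rcases List.pairwise_cons.mp hp with ⟨hhead, htail⟩
      set v := g (src t).1 (src t).2 with hv
      set g₁ := pvUpd g (pos t).1 (pos t).2 v with hg₁
      have hstep : pvLoop pos src (t :: L) g l = pvLoop pos src L g₁ (l ++ [v]) := by
        simp [pvLoop, pvUpd_self, hg₁, hv]
      have hg1src : ∀ u ∈ L, g₁ (src u).1 (src u).2 = g (src u).1 (src u).2 := by
        intro u hu
        exact pvUpd_ne_pair _ _ _ _ (hhead u hu).1
      obtain ⟨ihl, ihw, ihu⟩ := ih htail g₁ (l ++ [v])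
      refine ⟨?_, ?_, ?_⟩
      · rw [hstep, ihl, List.map_congr_left hg1src]
        simp [hv]
      · intro u hu
        rcases List.mem_cons.mp hu with rfl | hu'
        · rw [hstep]
          have hne : ∀ w ∈ L, ((pos u).1, (pos u).2) ≠ pos w := by
            intro w hw
            simpa using (hhead w hw).2
          rw [ihu _ _ hne, hg₁, hv, pvUpd_self]
        · rw [hstep, ihw u hu', hg1src u hu']
      · intro x y hxy
        rw [hstep, ihu x y (fun u hu => hxy u (List.mem_cons_of_mem _ hu))]
        exact pvUpd_ne_pair _ _ _ (x, y) (hxy t (List.mem_cons_self))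

-- B's write-back loop: the written value depends only on the coordinate
theorem foldl_pvUpd_char (v : Int × Int → Int) :
    ∀ (ps : List (Int × Int)) (g : Int → Int → Int) (x y : Int),
      (ps.foldl (fun h p => pvUpd h p.1 p.2 (v p)) g) x y
        = if (x, y) ∈ ps then v (x, y) else g x y := by
  intro ps
  induction ps with
  | nil => intro g x y; simp
  | cons p ps ih =>
      intro g x y
      rw [List.foldl_cons, ih]
      by_cases hm : (x, y) ∈ ps
      · simp [hm]
      · by_cases he : (x, y) = p
        · subst he; simp [hm, pvUpd_self]
        · rw [if_neg hm, if_neg (by simp [hm, he]), pvUpd_ne_pair _ _ _ _ he]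

-- membership in the ring border, arithmetically
theorem mem_pvRing (a b c d x y : Int) :
    ((x, y) ∈ pvRing a b c d) ↔
      (y = b ∧ a ≤ x ∧ x ≤ c) ∨ (x = c ∧ b + 1 ≤ y ∧ y ≤ d)
      ∨ (y = d ∧ a ≤ x ∧ x ≤ c - 1) ∨ (x = a ∧ b + 1 ≤ y ∧ y ≤ d - 1) := by
  simp only [pvRing, List.mem_append, List.mem_map, PySem.List.mem_pyRange_one,
    PySem.List.mem_pyRange_neg_one, Prod.mk.injEq]
  constructor
  · intro h
    rcases h with ⟨t, ht, h1, h2⟩ | ⟨t, ht, h1, h2⟩ | ⟨t, ht, h1, h2⟩ | ⟨t, ht, h1, h2⟩ <;> omega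
  · intro h
    rcases h with ⟨h0, h1⟩ | ⟨h0, h1⟩ | ⟨h0, h1⟩ | ⟨h0, h1⟩
    · exact Or.inl (Or.inl (Or.inl ⟨x, by omega, by omega, by omega⟩))
    · exact Or.inl (Or.inl (Or.inr ⟨y, by omega, by omega, by omega⟩))
    · exact Or.inl (Or.inr ⟨x, by omega, by omega, by omega⟩)
    · exact Or.inr ⟨y, by omega, by omega, by omega⟩

-- pointwise characterization of A's rotate, and its returned list
theorem pvRotate_char (a b c d : Int) (ha : a < c) (hb : b < d) (g : Int → Int → Int) :
    ((pvRotate a b c d g).1 = pvMin (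
        (PySem.List.pyRange a c 1).map (fun x => g (x + 1) b)
        ++ ((PySem.List.pyRange b d 1).map (fun y => g c (y + 1))
        ++ ((PySem.List.pyRange c a (-1)).map (fun x => g (x - 1) d)
        ++ ((PySem.List.pyRange d (b + 1) (-1)).map (fun y => g a (y - 1))
        ++ [g a b]))))) ∧
    (∀ x y, (pvRotate a b c d g).2 x y =
      if y = b ∧ a ≤ x ∧ x < c then g (x + 1) b
      else if x = c ∧ b ≤ y ∧ y < d then g c (y + 1)
      else if y = d ∧ a < x ∧ x ≤ c then g (x - 1) d
      else if x = a ∧ y = b + 1 then g a b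
      else if x = a ∧ b + 1 < y ∧ y ≤ d then g a (y - 1)
      else g x y) := by
  obtain ⟨L1, W1, U1⟩ := pvLoop_char (fun x => (x, b)) (fun x => (x + 1, b))
      (PySem.List.pyRange a c 1)
      ((PySem.List.pairwise_lt_pyRange_one a c).imp
        (fun h => ⟨pvPairNe₁ (by omega), pvPairNe₁ (by omega)⟩)) g []
  set st1 := pvLoop (fun x => (x, b)) (fun x => (x + 1, b)) (PySem.List.pyRange a c 1) g []
    with hst1
  obtain ⟨L2, W2, U2⟩ := pvLoop_char (fun y => ((c : Int), y)) (fun y => ((c : Int), y + 1))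
      (PySem.List.pyRange b d 1)
      ((PySem.List.pairwise_lt_pyRange_one b d).imp
        (fun h => ⟨pvPairNe₂ (by omega), pvPairNe₂ (by omega)⟩)) st1.1 st1.2
  set st2 := pvLoop (fun y => ((c : Int), y)) (fun y => ((c : Int), y + 1))
      (PySem.List.pyRange b d 1) st1.1 st1.2 with hst2
  have hgt3 : (PySem.List.pyRange c a (-1)).Pairwise (fun t u => u < t) := by
    rw [PySem.List.pyRange_neg_one_eq_reverse]
    exact (List.pairwise_reverse).mpr
      ((PySem.List.pairwise_lt_pyRange_one _ _).imp (fun h => h))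
  obtain ⟨L3, W3, U3⟩ := pvLoop_char (fun x => (x, d)) (fun x => (x - 1, d))
      (PySem.List.pyRange c a (-1))
      (hgt3.imp (fun h => ⟨pvPairNe₁ (by omega), pvPairNe₁ (by omega)⟩)) st2.1 st2.2
  set st3 := pvLoop (fun x => (x, d)) (fun x => (x - 1, d))
      (PySem.List.pyRange c a (-1)) st2.1 st2.2 with hst3
  have hgt4 : (PySem.List.pyRange d (b + 1) (-1)).Pairwise (fun t u => u < t) := by
    rw [PySem.List.pyRange_neg_one_eq_reverse]
    exact (List.pairwise_reverse).mpr
      ((PySem.List.pairwise_lt_pyRange_one _ _).imp (fun h => h))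
  obtain ⟨L4, W4, U4⟩ := pvLoop_char (fun y => ((a : Int), y)) (fun y => ((a : Int), y - 1))
      (PySem.List.pyRange d (b + 1) (-1))
      (hgt4.imp (fun h => ⟨pvPairNe₂ (by omega), pvPairNe₂ (by omega)⟩)) st3.1 st3.2
  set st4 := pvLoop (fun y => ((a : Int), y)) (fun y => ((a : Int), y - 1))
      (PySem.List.pyRange d (b + 1) (-1)) st3.1 st3.2 with hst4
  -- cleaned write/unwritten clauses, composed down to the original grid g
  have hG1w : ∀ x : Int, a ≤ x → x < c → st1.1 x b = g (x + 1) b := by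
    intro x h1 h2
    simpa using W1 x (PySem.List.mem_pyRange_one.mpr ⟨h1, h2⟩)
  have hG1u : ∀ x y : Int, ¬(y = b ∧ a ≤ x ∧ x < c) → st1.1 x y = g x y := by
    intro x y h
    refine U1 x y (fun t ht => ?_)
    have := PySem.List.mem_pyRange_one.mp ht
    by_cases hyb : y = b
    · exact pvPairNe₁ (by omega)
    · exact pvPairNe₂ (by simpa using hyb)
  have hG2u : ∀ x y : Int, ¬(x = c ∧ b ≤ y ∧ y < d) → st2.1 x y = st1.1 x y := by
    intro x y h
    refine U2 x y (fun t ht => ?_)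
    have := PySem.List.mem_pyRange_one.mp ht
    by_cases hxc : x = c
    · exact pvPairNe₂ (by omega)
    · exact pvPairNe₁ (by simpa using hxc)
  have hG2w : ∀ y : Int, b ≤ y → y < d → st2.1 c y = g c (y + 1) := by
    intro y h1 h2
    have := W2 y (PySem.List.mem_pyRange_one.mpr ⟨h1, h2⟩)
    simpa [hG1u c (y + 1) (by omega)] using this
  have hG3u : ∀ x y : Int, ¬(y = d ∧ a < x ∧ x ≤ c) → st3.1 x y = st2.1 x y := by
    intro x y h
    refine U3 x y (fun t ht => ?_)
    have := PySem.List.mem_pyRange_neg_one.mp ht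
    by_cases hyd : y = d
    · exact pvPairNe₁ (by omega)
    · exact pvPairNe₂ (by simpa using hyd)
  have hG3w : ∀ x : Int, a < x → x ≤ c → st3.1 x d = g (x - 1) d := by
    intro x h1 h2
    have := W3 x (PySem.List.mem_pyRange_neg_one.mpr ⟨h1, h2⟩)
    simpa [hG2u (x - 1) d (by omega), hG1u (x - 1) d (by omega)] using this
  have hG4u : ∀ x y : Int, ¬(x = a ∧ b + 1 < y ∧ y ≤ d) → st4.1 x y = st3.1 x y := by
    intro x y h
    refine U4 x y (fun t ht => ?_)
    have := PySem.List.mem_pyRange_neg_one.mp ht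
    by_cases hxa : x = a
    · exact pvPairNe₂ (by omega)
    · exact pvPairNe₁ (by simpa using hxa)
  have hG4w : ∀ y : Int, b + 1 < y → y ≤ d → st4.1 a y = g a (y - 1) := by
    intro y h1 h2
    have := W4 y (PySem.List.mem_pyRange_neg_one.mpr ⟨by omega, h2⟩)
    simpa [hG3u a (y - 1) (by omega), hG2u a (y - 1) (by omega),
      hG1u a (y - 1) (by omega)] using this
  constructor
  · -- the returned list
    have hL1 : st1.2 = (PySem.List.pyRange a c 1).map (fun x => g (x + 1) b) := by
      simpa using L1
    have hL2 : st2.2 = st1.2 ++ (PySem.List.pyRange b d 1).map (fun y => g c (y + 1)) := by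
      rw [L2]
      congr 1
      refine List.map_congr_left (fun y hy => ?_)
      have := PySem.List.mem_pyRange_one.mp hy
      simpa using hG1u c (y + 1) (by omega)
    have hL3 : st3.2 = st2.2 ++ (PySem.List.pyRange c a (-1)).map (fun x => g (x - 1) d) := by
      rw [L3]
      congr 1
      refine List.map_congr_left (fun x hx => ?_)
      have := PySem.List.mem_pyRange_neg_one.mp hx
      have e1 : st2.1 (x - 1) d = st1.1 (x - 1) d := hG2u (x - 1) d (by omega)
      have e2 : st1.1 (x - 1) d = g (x - 1) d := hG1u (x - 1) d (by omega)
      simpa using e1.trans e2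
    have hL4 : st4.2 = st3.2 ++ (PySem.List.pyRange d (b + 1) (-1)).map (fun y => g a (y - 1)) := by
      rw [L4]
      congr 1
      refine List.map_congr_left (fun y hy => ?_)
      have := PySem.List.mem_pyRange_neg_one.mp hy
      have e1 : st3.1 a (y - 1) = st2.1 a (y - 1) := hG3u a (y - 1) (by omega)
      have e2 : st2.1 a (y - 1) = st1.1 a (y - 1) := hG2u a (y - 1) (by omega)
      have e3 : st1.1 a (y - 1) = g a (y - 1) := hG1u a (y - 1) (by omega)
      simpa using (e1.trans e2).trans e3
    show pvMin (st4.2 ++ [g a b]) = _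
    rw [hL4, hL3, hL2, hL1]
    simp [List.append_assoc]
  · -- the final grid, pointwise
    intro x y
    show pvUpd st4.1 a (b + 1) (g a b) x y = _
    by_cases h1 : y = b ∧ a ≤ x ∧ x < c
    · rw [if_pos h1, pvUpd_ne _ _ _ _ _ _ (by omega), hG4u x y (by omega), hG3u x y (by omega),
        hG2u x y (by omega)]
      obtain ⟨rfl, h1a, h1c⟩ := h1
      exact hG1w x h1a h1c
    · rw [if_neg h1]
      by_cases h2 : x = c ∧ b ≤ y ∧ y < d
      · rw [if_pos h2, pvUpd_ne _ _ _ _ _ _ (by omega), hG4u x y (by omega), hG3u x y (by omega)]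
        obtain ⟨rfl, hby, hyd⟩ := h2
        exact hG2w y hby hyd
      · rw [if_neg h2]
        by_cases h3 : y = d ∧ a < x ∧ x ≤ c
        · rw [if_pos h3, pvUpd_ne _ _ _ _ _ _ (by omega), hG4u x y (by omega)]
          obtain ⟨rfl, hax, hxc⟩ := h3
          exact hG3w x hax hxc
        · rw [if_neg h3]
          by_cases h4 : x = a ∧ y = b + 1
          · rw [if_pos h4]
            obtain ⟨rfl, rfl⟩ := h4
            exact pvUpd_self _ _ _ _
          · rw [if_neg h4]
            by_cases h5 : x = a ∧ b + 1 < y ∧ y ≤ d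
            · rw [if_pos h5, pvUpd_ne _ _ _ _ _ _ (by omega)]
              obtain ⟨rfl, hy1, hy2⟩ := h5
              exact hG4w y hy1 hy2
            · rw [if_neg h5, pvUpd_ne _ _ _ _ _ _ (by omega), hG4u x y (by omega),
                hG3u x y (by omega), hG2u x y (by omega), hG1u x y (by omega)]

-- pointwise characterization of B's write-back fold
theorem pvRotateAlt_snd_char (x1 y1 x2 y2 : Int) (g : Int → Int → Int) (x y : Int) :
    (pvRotateAlt x1 y1 x2 y2 g).2 x y =
      if (x, y) ∈ pvRing x1 y1 x2 y2
      then g (pvSucc x1 y1 x2 y2 (x, y)).1 (pvSucc x1 y1 x2 y2 (x, y)).2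
      else g x y := by
  exact foldl_pvUpd_char (fun p => g (pvSucc x1 y1 x2 y2 p).1 (pvSucc x1 y1 x2 y2 p).2)
    (pvRing x1 y1 x2 y2) g x y

theorem map_pyRange_shift_one {α : Type} (f : Int → α) (a c : Int) :
    (PySem.List.pyRange (a + 1) (c + 1) 1).map f
      = (PySem.List.pyRange a c 1).map (fun x => f (x + 1)) := by
  rw [PySem.List.pyRange_one, PySem.List.pyRange_one, List.map_map, List.map_map]
  rw [show c + 1 - (a + 1) = c - a by ring]
  refine List.map_congr_left (fun k _ => ?_)
  simp only [Function.comp]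
  congr 1
  ring

theorem map_pyRange_shift_neg {α : Type} (f : Int → α) (a c : Int) :
    (PySem.List.pyRange (c - 1) (a - 1) (-1)).map f
      = (PySem.List.pyRange c a (-1)).map (fun x => f (x - 1)) := by
  rw [PySem.List.pyRange_neg_one, PySem.List.pyRange_neg_one, List.map_map, List.map_map]
  rw [show c - 1 - (a - 1) = c - a by ring]
  refine List.map_congr_left (fun k _ => ?_)
  simp only [Function.comp]
  congr 1
  ring

theorem pvFoldlMin_out :
    ∀ (t : List Int) (i j : Int), min (t.foldl min i) j = t.foldl min (min i j) := by
  intro t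
  induction t with
  | nil => intro i j; rfl
  | cons x t ih =>
      intro i j
      simp only [List.foldl_cons]
      rw [ih (min i x) j]
      congr 1
      omega

theorem pvMin_rotate (h : Int) (t : List Int) : pvMin (t ++ [h]) = pvMin (h :: t) := by
  cases t with
  | nil => rfl
  | cons h' t' =>
      simp only [List.cons_append, pvMin, List.foldl_append, List.foldl_cons, List.foldl_nil]
      rw [pvFoldlMin_out]
      congr 1
      omega

theorem pvRotate_eq_alt (a b c d : Int) (ha : a < c) (hb : b < d) (g : Int → Int → Int) :
    (pvRotate a b c d g).1 = (pvRotateAlt a b c d g).1 ∧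
    (∀ x y, (pvRotate a b c d g).2 x y = (pvRotateAlt a b c d g).2 x y) := by
  obtain ⟨hfst, hsnd⟩ := pvRotate_char a b c d ha hb g
  constructor
  · rw [hfst]
    show _ = pvMin ((pvRing a b c d).map (fun p => g p.1 p.2))
    rw [pvRing]
    simp only [List.map_append, List.map_map]
    rw [PySem.List.pyRange_one_cons (show a < c + 1 by omega)]
    have e1 : (PySem.List.pyRange (a + 1) (c + 1) 1).map
        ((fun p : Int × Int => g p.1 p.2) ∘ (fun x => (x, b)))
        = (PySem.List.pyRange a c 1).map (fun x => g (x + 1) b) :=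
      map_pyRange_shift_one ((fun p : Int × Int => g p.1 p.2) ∘ (fun x => (x, b))) a c
    have e2 : (PySem.List.pyRange (b + 1) (d + 1) 1).map
        ((fun p : Int × Int => g p.1 p.2) ∘ (fun y => (c, y)))
        = (PySem.List.pyRange b d 1).map (fun y => g c (y + 1)) :=
      map_pyRange_shift_one ((fun p : Int × Int => g p.1 p.2) ∘ (fun y => (c, y))) b d
    have e3 : (PySem.List.pyRange (c - 1) (a - 1) (-1)).map
        ((fun p : Int × Int => g p.1 p.2) ∘ (fun x => (x, d)))
        = (PySem.List.pyRange c a (-1)).map (fun x => g (x - 1) d) :=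
      map_pyRange_shift_neg ((fun p : Int × Int => g p.1 p.2) ∘ (fun x => (x, d))) a c
    have e4 : (PySem.List.pyRange (d - 1) b (-1)).map
        ((fun p : Int × Int => g p.1 p.2) ∘ (fun y => (a, y)))
        = (PySem.List.pyRange d (b + 1) (-1)).map (fun y => g a (y - 1)) := by
      have := map_pyRange_shift_neg ((fun p : Int × Int => g p.1 p.2) ∘ (fun y => (a, y))) (b + 1) d
      rw [show b + 1 - 1 = b by ring] at this
      exact this
    rw [List.map_cons, e1, e2, e3, e4]
    have := pvMin_rotate (g a b)
      ((PySem.List.pyRange a c 1).map (fun x => g (x + 1) b)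
        ++ ((PySem.List.pyRange b d 1).map (fun y => g c (y + 1))
        ++ ((PySem.List.pyRange c a (-1)).map (fun x => g (x - 1) d)
        ++ (PySem.List.pyRange d (b + 1) (-1)).map (fun y => g a (y - 1)))))
    simp only [List.append_assoc, List.cons_append] at this ⊢
    exact this
  · intro x y
    rw [hsnd x y, pvRotateAlt_snd_char]
    by_cases h1 : y = b ∧ a ≤ x ∧ x < c
    · obtain ⟨hyb, hax, hxc⟩ := h1
      rw [if_pos ⟨hyb, hax, hxc⟩, if_pos ((mem_pvRing a b c d x y).mpr (by omega))]
      have hs : pvSucc a b c d (x, y) = (x + 1, y) := by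
        simp only [pvSucc]
        rw [if_pos ⟨hyb, hxc⟩]
      rw [hs]
      show g (x + 1) b = g (x + 1) y
      rw [hyb]
    · rw [if_neg h1]
      by_cases h2 : x = c ∧ b ≤ y ∧ y < d
      · obtain ⟨hxc, hby, hyd⟩ := h2
        rw [if_pos ⟨hxc, hby, hyd⟩, if_pos ((mem_pvRing a b c d x y).mpr (by omega))]
        have hs : pvSucc a b c d (x, y) = (x, y + 1) := by
          simp only [pvSucc]
          rw [if_neg (by omega), if_pos ⟨hxc, hyd⟩]
        rw [hs]
        show g c (y + 1) = g x (y + 1)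
        rw [hxc]
      · rw [if_neg h2]
        by_cases h3 : y = d ∧ a < x ∧ x ≤ c
        · obtain ⟨hyd, hax, hxc⟩ := h3
          rw [if_pos ⟨hyd, hax, hxc⟩, if_pos ((mem_pvRing a b c d x y).mpr (by omega))]
          have hs : pvSucc a b c d (x, y) = (x - 1, y) := by
            simp only [pvSucc]
            rw [if_neg (by omega), if_neg (by omega), if_pos ⟨hyd, hax⟩]
          rw [hs]
          show g (x - 1) d = g (x - 1) y
          rw [hyd]
        · rw [if_neg h3]
          by_cases h4 : x = a ∧ y = b + 1
          · obtain ⟨hxa, hy1⟩ := h4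
            rw [if_pos ⟨hxa, hy1⟩, if_pos ((mem_pvRing a b c d x y).mpr (by omega))]
            have hs : pvSucc a b c d (x, y) = (x, y - 1) := by
              simp only [pvSucc]
              rw [if_neg (by omega), if_neg (by omega), if_neg (by omega)]
            rw [hs]
            show g a b = g x (y - 1)
            rw [hxa, hy1]
            congr 1
            omega
          · rw [if_neg h4]
            by_cases h5 : x = a ∧ b + 1 < y ∧ y ≤ d
            · obtain ⟨hxa, hy1, hy2⟩ := h5
              rw [if_pos ⟨hxa, hy1, hy2⟩, if_pos ((mem_pvRing a b c d x y).mpr (by omega))]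
              have hs : pvSucc a b c d (x, y) = (x, y - 1) := by
                simp only [pvSucc]
                rw [if_neg (by omega), if_neg (by omega), if_neg (by omega)]
              rw [hs]
              show g a (y - 1) = g x (y - 1)
              rw [hxa]
            · rw [if_neg h5,
                if_neg (fun hm => by have := (mem_pvRing a b c d x y).mp hm; omega)]

-- B's rotate reads only the rectangle [a..c] × [b..d] and changes only its border
def pvAgree (rows columns : Int) (g h : Int → Int → Int) : Prop :=
  ∀ i j : Int, 0 ≤ i → i < rows → 0 ≤ j → j < columns → g i j = h i j

theorem pvRotateAlt_congr (rows columns a b c d : Int) (ha : a < c) (hb : b < d)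
    (ha0 : 0 ≤ a) (hc : c < rows) (hb0 : 0 ≤ b) (hd : d < columns)
    (g h : Int → Int → Int) (hag : pvAgree rows columns g h) :
    (pvRotateAlt a b c d g).1 = (pvRotateAlt a b c d h).1 ∧
    pvAgree rows columns (pvRotateAlt a b c d g).2 (pvRotateAlt a b c d h).2 := by
  constructor
  · show pvMin ((pvRing a b c d).map (fun p => g p.1 p.2))
        = pvMin ((pvRing a b c d).map (fun p => h p.1 p.2))
    refine congrArg pvMin (List.map_congr_left (fun p hp => ?_))
    have hm := (mem_pvRing a b c d p.1 p.2).mp (by simpa using hp)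
    exact hag p.1 p.2 (by omega) (by omega) (by omega) (by omega)
  · intro i j hi0 hir hj0 hjc
    rw [pvRotateAlt_snd_char, pvRotateAlt_snd_char]
    by_cases hm : (i, j) ∈ pvRing a b c d
    · rw [if_pos hm, if_pos hm]
      have harith := (mem_pvRing a b c d i j).mp hm
      have hs : a ≤ (pvSucc a b c d (i, j)).1 ∧ (pvSucc a b c d (i, j)).1 ≤ c ∧
                b ≤ (pvSucc a b c d (i, j)).2 ∧ (pvSucc a b c d (i, j)).2 ≤ d := by
        simp only [pvSucc]
        split_ifs <;> simp <;> omega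
      exact hag _ _ (by omega) (by omega) (by omega) (by omega)
    · rw [if_neg hm, if_neg hm]
      exact hag i j hi0 hir hj0 hjc

-- one row of A's grid-building loop: the value written depends only on the coordinate
theorem pvFoldRow_char (i columns : Int) :
    ∀ (L : List Int) (g : Int → Int → Int) (x y : Int),
      (L.foldl (fun g j => pvUpd g i j (i * columns + j + 1)) g) x y
        = if x = i ∧ y ∈ L then i * columns + y + 1 else g x y := by
  intro L
  induction L with
  | nil => intro g x y; simp
  | cons j L ih =>
      intro g x y
      rw [List.foldl_cons, ih]
      by_cases hm : x = i ∧ y ∈ L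
      · rw [if_pos hm, if_pos ⟨hm.1, List.mem_cons_of_mem _ hm.2⟩]
      · rw [if_neg hm]
        by_cases he : x = i ∧ y = j
        · obtain ⟨rfl, rfl⟩ := he
          rw [pvUpd_self, if_pos ⟨rfl, List.mem_cons_self⟩]
        · rw [pvUpd_ne _ _ _ _ _ _ he,
            if_neg (by simp only [List.mem_cons]; tauto)]

theorem pvFoldBuild_char (rows columns : Int) (x y : Int) :
    ((PySem.List.pyRange 0 rows 1).foldl (fun g i =>
        (PySem.List.pyRange 0 columns 1).foldl
          (fun g j => pvUpd g i j (i * columns + j + 1)) g) (fun _ _ => 1)) x y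
      = if x ∈ PySem.List.pyRange 0 rows 1 ∧ y ∈ PySem.List.pyRange 0 columns 1
        then x * columns + y + 1 else 1 := by
  suffices h : ∀ (L : List Int) (g : Int → Int → Int),
      (L.foldl (fun g i => (PySem.List.pyRange 0 columns 1).foldl
          (fun g j => pvUpd g i j (i * columns + j + 1)) g) g) x y
        = if x ∈ L ∧ y ∈ PySem.List.pyRange 0 columns 1 then x * columns + y + 1 else g x y by
    exact h _ _
  intro L
  induction L with
  | nil => intro g; simp
  | cons i L ih =>
      intro g
      rw [List.foldl_cons, ih, pvFoldRow_char]
      by_cases hm : x ∈ L ∧ y ∈ PySem.List.pyRange 0 columns 1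
      · rw [if_pos hm, if_pos ⟨List.mem_cons_of_mem _ hm.1, hm.2⟩]
      · rw [if_neg hm]
        by_cases he : x = i ∧ y ∈ PySem.List.pyRange 0 columns 1
        · rw [if_pos he, if_pos ⟨by rw [he.1]; exact List.mem_cons_self, he.2⟩, he.1]
        · rw [if_neg he, if_neg (by simp only [List.mem_cons]; tauto)]

-- A's grid-building double loop produces the closed-form values in range
theorem pvBuild_char (rows columns : Int) :
    pvAgree rows columns
      ((PySem.List.pyRange 0 rows 1).foldl (fun g i =>
          (PySem.List.pyRange 0 columns 1).foldl
            (fun g j => pvUpd g i j (i * columns + j + 1)) g) (fun _ _ => 1))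
      (fun i j => if 0 ≤ i ∧ i < rows ∧ 0 ≤ j ∧ j < columns then i * columns + j + 1 else 0) := by
  intro i j h0 h1 h2 h3
  rw [pvFoldBuild_char,
    if_pos ⟨PySem.List.mem_pyRange_one.mpr ⟨h0, h1⟩, PySem.List.mem_pyRange_one.mpr ⟨h2, h3⟩⟩]
  simp [h0, h1, h2, h3]

-- the per-query folds agree when the grids agree in range and all queries are proper
theorem pvFold_queries (rows columns : Int) :
    ∀ (qs : List (Int × Int × Int × Int)) (acc : List Int) (g h : Int → Int → Int),
      pvAgree rows columns g h →
      (∀ q ∈ qs, 1 ≤ q.1 ∧ q.1 < q.2.2.1 ∧ q.2.2.1 ≤ rows ∧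
                 1 ≤ q.2.1 ∧ q.2.1 < q.2.2.2 ∧ q.2.2.2 ≤ columns) →
      (qs.foldl (fun (p : List Int × (Int → Int → Int)) q =>
          let t := pvRotate (q.1 - 1) (q.2.1 - 1) (q.2.2.1 - 1) (q.2.2.2 - 1) p.2
          (p.1 ++ [t.1], t.2)) (acc, g)).1
      = (qs.foldl (fun (p : List Int × (Int → Int → Int)) q =>
          let t := pvRotateAlt (q.1 - 1) (q.2.1 - 1) (q.2.2.1 - 1) (q.2.2.2 - 1) p.2
          (p.1 ++ [t.1], t.2)) (acc, h)).1 := by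
  intro qs
  induction qs with
  | nil => intro acc g h _ _; rfl
  | cons q qs ih =>
      intro acc g h hag hq
      obtain ⟨h1, h2, h3, h4, h5, h6⟩ := hq q List.mem_cons_self
      have hac : q.1 - 1 < q.2.2.1 - 1 := by omega
      have hbd : q.2.1 - 1 < q.2.2.2 - 1 := by omega
      obtain ⟨heq1, heq2⟩ :=
        pvRotate_eq_alt (q.1 - 1) (q.2.1 - 1) (q.2.2.1 - 1) (q.2.2.2 - 1) hac hbd g
      obtain ⟨hc1, hc2⟩ :=
        pvRotateAlt_congr rows columns (q.1 - 1) (q.2.1 - 1) (q.2.2.1 - 1) (q.2.2.2 - 1)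
          hac hbd (by omega) (by omega) (by omega) (by omega) g h hag
      have hag' : pvAgree rows columns
          (pvRotate (q.1 - 1) (q.2.1 - 1) (q.2.2.1 - 1) (q.2.2.2 - 1) g).2
          (pvRotateAlt (q.1 - 1) (q.2.1 - 1) (q.2.2.1 - 1) (q.2.2.2 - 1) h).2 := by
        intro i j hi0 hir hj0 hjc
        rw [heq2 i j]
        exact hc2 i j hi0 hir hj0 hjc
      simp only [List.foldl_cons]
      rw [show (pvRotate (q.1 - 1) (q.2.1 - 1) (q.2.2.1 - 1) (q.2.2.2 - 1) g).1
          = (pvRotateAlt (q.1 - 1) (q.2.1 - 1) (q.2.2.1 - 1) (q.2.2.2 - 1) h).1 from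
          heq1.trans hc1]
      exact ih _ _ _ hag' (fun q' hq' => hq q' (List.mem_cons_of_mem _ hq'))

-- ===== VERDICT (by name: the statement is the Claim_ definition above) =====
theorem solution_spec : Claim_equal_solution := by
  intro rows columns queries _ hpre
  unfold Spec_solution solution solution_alt
  exact pvFold_queries rows columns queries [] _ _ (pvBuild_char rows columns) hpre
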